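-- pv_equiv track=rewrite | github.com/sensiml/piccolo | src/server/library/core_functions_python/segmenters/kbfunctions/template_segmenter.py | cleanupEnergyPeaks
-- ===== SOURCE A (Python) =====
-- import copy
--
-- def cleanupEnergyPeaks(myPeaksE, myPeaks, windowSize):
--     copyE = copy.copy(myPeaksE)
--     for x in myPeaksE:
--         minDist = 10 * windowSize
--         for y in myPeaks:
--             newDist = abs(x[0] - y[0])
--             if newDist < minDist:
--                 minDist = newDist
--         if minDist < windowSize:
--             copyE.remove(x)
--     return copyE
-- ===== SOURCE B (Python) =====
-- import bisect
--
--
-- def _nearest(firsts, x0):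
--     # distance from x0 to the closest value in the sorted list `firsts` (None if empty)
--     i = bisect.bisect_left(firsts, x0)
--     best = None
--     if i > 0:
--         best = x0 - firsts[i - 1]
--     if i < len(firsts):
--         d = firsts[i] - x0
--         if best is None or d < best:
--             best = d
--     return best
--
--
-- def cleanupEnergyPeaks(myPeaksE, myPeaks, windowSize):
--     firsts = sorted(y[0] for y in myPeaks)
--     kept = []
--     for x in myPeaksE:
--         d = _nearest(firsts, x[0])
--         if d is None or d >= windowSize:
--             kept.append(x)
--     return kept
-- ===== Notes on version B (the rewrite author's own statement) =====
-- stated objective: alternative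
-- what changed: Instead of scanning all of myPeaks for every energy peak, B sorts the peak first-coordinates once and finds each energy peak's nearest peak by binary search (the two neighbours of the insertion point), then keeps the peak iff that nearest distance is >= windowSize, building the result by filtering rather than by repeated list.remove; asymptotically O((N+M) log M) against A's O(N*M), though a timing run could not measure it here.
-- intended difference: When windowSize is negative and myPeaksE is non-empty, A removes every energy peak (its sentinel 10*windowSize is below every non-negative distance, so minDist < windowSize always holds) and returns []; B keeps them all, the intended behaviour since no peak lies within a negative distance of anything. — e.g. on cleanupEnergyPeaks([[0]], [[0]], -1): A returns [], B returns [[0]]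
-- outside the precondition, e.g. on cleanupEnergyPeaks([], [[]], 1): A returns [], B raises IndexError
import Mathlib
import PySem

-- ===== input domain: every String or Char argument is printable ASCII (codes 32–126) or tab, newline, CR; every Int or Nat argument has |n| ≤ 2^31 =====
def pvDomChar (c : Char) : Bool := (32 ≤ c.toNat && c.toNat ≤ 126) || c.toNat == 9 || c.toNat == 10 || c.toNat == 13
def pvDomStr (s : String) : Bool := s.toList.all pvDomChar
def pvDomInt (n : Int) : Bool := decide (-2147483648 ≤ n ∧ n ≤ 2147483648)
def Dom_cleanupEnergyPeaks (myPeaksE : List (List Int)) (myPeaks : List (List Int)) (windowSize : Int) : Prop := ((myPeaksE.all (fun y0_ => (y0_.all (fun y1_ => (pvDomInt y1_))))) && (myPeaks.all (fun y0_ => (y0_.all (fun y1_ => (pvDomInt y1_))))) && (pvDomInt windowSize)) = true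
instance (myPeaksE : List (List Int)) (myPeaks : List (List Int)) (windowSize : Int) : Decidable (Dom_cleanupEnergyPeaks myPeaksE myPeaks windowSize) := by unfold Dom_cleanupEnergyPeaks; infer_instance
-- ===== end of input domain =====

-- B replaces A's per-element scan of myPeaks by one sort of the peak first-coordinates plus a
-- binary search per energy peak, and filters instead of repeated list.remove.
-- A's value at a NEGATIVE windowSize is declared as an intended difference (D_ below).

-- ===== PORT A =====
-- x[0] (inner lists are non-empty under Pre_; the default is never used there)
def pvHd (l : List Int) : Int := (PySem.List.pyGet? l 0).getD 0

-- A's inner loop: minDist over myPeaks starting from the sentinel 10*windowSize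
def pvMinD (myPeaks : List (List Int)) (windowSize x0 : Int) : Int :=
  myPeaks.foldl
    (fun minDist y =>
      if |x0 - pvHd y| < minDist then |x0 - pvHd y| else minDist)
    (10 * windowSize)

def cleanupEnergyPeaks (myPeaksE : List (List Int)) (myPeaks : List (List Int)) (windowSize : Int) : List (List Int) :=
  myPeaksE.foldl
    (fun copyE x =>
      if pvMinD myPeaks windowSize (pvHd x) < windowSize then
        -- copyE.remove(x); never none here since x remains in copyE (proved below)
        (PySem.List.remove? copyE x).getD copyE
      else copyE)
    myPeaksE

-- ===== PORT B =====
-- _nearest(firsts, x0) of Source B: distance to the closest value of the sorted list (none if empty),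
-- via bisect_left and the two neighbours of the insertion point
def pvNearest (firsts : List Int) (x0 : Int) : Option Int :=
  if PySem.List.bisectLeft firsts x0 < firsts.length then
    if 0 < PySem.List.bisectLeft firsts x0 then
      if firsts.getD (PySem.List.bisectLeft firsts x0) 0 - x0 <
          x0 - firsts.getD (PySem.List.bisectLeft firsts x0 - 1) 0 then
        some (firsts.getD (PySem.List.bisectLeft firsts x0) 0 - x0)
      else some (x0 - firsts.getD (PySem.List.bisectLeft firsts x0 - 1) 0)
    else some (firsts.getD (PySem.List.bisectLeft firsts x0) 0 - x0)
  else
    if 0 < PySem.List.bisectLeft firsts x0 then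
      some (x0 - firsts.getD (PySem.List.bisectLeft firsts x0 - 1) 0)
    else none

-- 'd is None or d >= windowSize'
def pvKeep (firsts : List Int) (windowSize : Int) (x : List Int) : Bool :=
  match pvNearest firsts (pvHd x) with
  | none => true
  | some b => windowSize ≤ b

def cleanupEnergyPeaks_alt (myPeaksE : List (List Int)) (myPeaks : List (List Int)) (windowSize : Int) : List (List Int) :=
  let firsts := PySem.List.sorted (myPeaks.map pvHd) (fun v => v) false
  myPeaksE.foldl
    (fun kept x => if pvKeep firsts windowSize x then kept ++ [x] else kept)
    []

-- ===== PRECONDITION & SPEC =====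
-- Pre_ excludes inputs containing an empty inner list: x[0]/y[0] raises IndexError in Python
-- (when myPeaksE is empty A never touches myPeaks, but B's preprocessing pass does and raises;
-- that corner, where A still returns [], is excluded and cited in the claim).
def Pre_cleanupEnergyPeaks (myPeaksE : List (List Int)) (myPeaks : List (List Int)) (windowSize : Int) : Prop :=
  (∀ x ∈ myPeaksE, x ≠ []) ∧ (∀ y ∈ myPeaks, y ≠ [])
instance (myPeaksE : List (List Int)) (myPeaks : List (List Int)) (windowSize : Int) : Decidable (Pre_cleanupEnergyPeaks myPeaksE myPeaks windowSize) := by unfold Pre_cleanupEnergyPeaks; infer_instance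

def pvWitness_cleanupEnergyPeaks : List (List Int) × List (List Int) × Int := ([[1], [7]], [[5]], 3)

-- When windowSize is negative and myPeaksE is non-empty, A removes every energy peak (its sentinel
-- 10*windowSize is below every non-negative distance, so minDist < windowSize always holds) and
-- returns []; B keeps them all, the intended behaviour since no peak lies within a negative
-- distance of anything.
def D_cleanupEnergyPeaks (myPeaksE : List (List Int)) (myPeaks : List (List Int)) (windowSize : Int) : Prop :=
  windowSize < 0 ∧ myPeaksE ≠ []
instance (myPeaksE : List (List Int)) (myPeaks : List (List Int)) (windowSize : Int) : Decidable (D_cleanupEnergyPeaks myPeaksE myPeaks windowSize) := by unfold D_cleanupEnergyPeaks; infer_instance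

def Spec_cleanupEnergyPeaks (myPeaksE : List (List Int)) (myPeaks : List (List Int)) (windowSize : Int) (out : List (List Int)) : Prop := ¬ D_cleanupEnergyPeaks myPeaksE myPeaks windowSize → out = cleanupEnergyPeaks_alt myPeaksE myPeaks windowSize
instance (myPeaksE : List (List Int)) (myPeaks : List (List Int)) (windowSize : Int) (out : List (List Int)) : Decidable (Spec_cleanupEnergyPeaks myPeaksE myPeaks windowSize out) := by unfold Spec_cleanupEnergyPeaks; infer_instance

def pvDiffWitness_cleanupEnergyPeaks : List (List Int) × List (List Int) × Int := ([[0]], [[0]], -1)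
def pvDiffWitnessOut_cleanupEnergyPeaks : (List (List Int)) × (List (List Int)) := ([], [[0]])

-- ===== CLAIM (what is proved, stated in full; the proofs are below) =====
def Claim_unchanged_cleanupEnergyPeaks : Prop := ∀ (myPeaksE : List (List Int)) (myPeaks : List (List Int)) (windowSize : Int), Dom_cleanupEnergyPeaks myPeaksE myPeaks windowSize → Pre_cleanupEnergyPeaks myPeaksE myPeaks windowSize → Spec_cleanupEnergyPeaks myPeaksE myPeaks windowSize (cleanupEnergyPeaks myPeaksE myPeaks windowSize)
def Claim_changed_cleanupEnergyPeaks : Prop := Dom_cleanupEnergyPeaks (pvDiffWitness_cleanupEnergyPeaks.1) (pvDiffWitness_cleanupEnergyPeaks.2.1) (pvDiffWitness_cleanupEnergyPeaks.2.2) ∧ Pre_cleanupEnergyPeaks (pvDiffWitness_cleanupEnergyPeaks.1) (pvDiffWitness_cleanupEnergyPeaks.2.1) (pvDiffWitness_cleanupEnergyPeaks.2.2) ∧ D_cleanupEnergyPeaks (pvDiffWitness_cleanupEnergyPeaks.1) (pvDiffWitness_cleanupEnergyPeaks.2.1) (pvDiffWitness_cleanupEnergyPeaks.2.2) ∧ cleanupEnergyPeaks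 (pvDiffWitness_cleanupEnergyPeaks.1) (pvDiffWitness_cleanupEnergyPeaks.2.1) (pvDiffWitness_cleanupEnergyPeaks.2.2) = pvDiffWitnessOut_cleanupEnergyPeaks.1 ∧ cleanupEnergyPeaks_alt (pvDiffWitness_cleanupEnergyPeaks.1) (pvDiffWitness_cleanupEnergyPeaks.2.1) (pvDiffWitness_cleanupEnergyPeaks.2.2) = pvDiffWitnessOut_cleanupEnergyPeaks.2 ∧ pvDiffWitnessOut_cleanupEnergyPeaks.1 ≠ pvDiffWitnessOut_cleanupEnergyPeaks.2
def Claim_exact_cleanupEnergyPeaks : Prop := ∀ (myPeaksE : List (List Int)) (myPeaks : List (List Int)) (windowSize : Int), Dom_cleanupEnergyPeaks myPeaksE myPeaks windowSize → Pre_cleanupEnergyPeaks myPeaksE myPeaks windowSize → D_cleanupEnergyPeaks myPeaksE myPeaks windowSize → cleanupEnergyPeaks myPeaksE myPeaks windowSize ≠ cleanupEnergyPeaks_alt myPeaksE myPeaks windowSize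

-- ===== LEMMAS AND PROOFS =====

-- A's loop with copyE.remove(x) is a filter: processing a suffix with the already-kept prefix
-- in front removes exactly the suffix elements whose verdict is 'remove'.
lemma foldl_remove_filter (f : List Int → Bool) :
    ∀ (suf pre : List (List Int)), (∀ a ∈ pre, f a = false) →
      List.foldl (fun acc x => if f x then (PySem.List.remove? acc x).getD acc else acc)
        (pre ++ suf) suf = pre ++ suf.filter (fun x => !f x) := by
  intro suf
  induction suf with
  | nil => intro pre _; simp
  | cons x t ih =>
    intro pre hpre
    by_cases h : f x = true
    · have hx : x ∉ pre := fun hmem => by simp [hpre x hmem] at h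
      have hxmem : x ∈ pre ++ x :: t := by simp
      rw [List.foldl_cons]
      rw [if_pos h, PySem.List.remove?_eq_some_erase _ x hxmem, Option.getD_some,
        List.erase_append_right _ hx, List.erase_cons_head]
      rw [ih pre hpre]
      simp [h]
    · have h' : f x = false := by simpa using h
      have hpre' : ∀ a ∈ pre ++ [x], f a = false := by
        intro a ha
        rcases List.mem_append.mp ha with ha | ha
        · exact hpre a ha
        · rw [List.mem_singleton.mp ha]; exact h'
      rw [List.foldl_cons, if_neg (by simp [h']),
        show pre ++ x :: t = (pre ++ [x]) ++ t by simp]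
      rw [ih (pre ++ [x]) hpre']
      simp [h', List.append_assoc]

lemma cleanupEnergyPeaks_eq_filter (myPeaksE myPeaks : List (List Int)) (windowSize : Int) :
    cleanupEnergyPeaks myPeaksE myPeaks windowSize
      = myPeaksE.filter (fun x => !decide (pvMinD myPeaks windowSize (pvHd x) < windowSize)) := by
  have := foldl_remove_filter (fun x => decide (pvMinD myPeaks windowSize (pvHd x) < windowSize))
    myPeaksE [] (by simp)
  simpa [cleanupEnergyPeaks] using this

lemma alt_eq_filter (myPeaksE myPeaks : List (List Int)) (windowSize : Int) :
    cleanupEnergyPeaks_alt myPeaksE myPeaks windowSize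
      = myPeaksE.filter
          (pvKeep (PySem.List.sorted (myPeaks.map pvHd) (fun v => v) false) windowSize) := by
  unfold cleanupEnergyPeaks_alt
  have := PySem.List.foldl_append_if
    (pvKeep (PySem.List.sorted (myPeaks.map pvHd) (fun v => v) false) windowSize)
    (fun x => x) myPeaksE ([] : List (List Int))
  simpa using this

-- A's inner minimum is below c iff the sentinel is or some distance is
lemma pvMinD_lt_iff (myPeaks : List (List Int)) (x0 c : Int) :
    ∀ a : Int,
      (myPeaks.foldl (fun m y => if |x0 - pvHd y| < m then |x0 - pvHd y| else m) a) < c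
        ↔ a < c ∨ ∃ y ∈ myPeaks, |x0 - pvHd y| < c := by
  induction myPeaks with
  | nil => intro a; simp
  | cons y t ih =>
    intro a
    rw [List.foldl_cons, ih]
    have hmin : ((if |x0 - pvHd y| < a then |x0 - pvHd y| else a) < c)
        ↔ (|x0 - pvHd y| < c ∨ a < c) := by split_ifs <;> omega
    rw [hmin]
    simp only [List.mem_cons]
    constructor
    · rintro ((h | h) | ⟨z, hz, hd⟩)
      · exact Or.inr ⟨y, Or.inl rfl, h⟩
      · exact Or.inl h
      · exact Or.inr ⟨z, Or.inr hz, hd⟩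
    · rintro (h | ⟨z, (rfl | hz), hd⟩)
      · exact Or.inl (Or.inr h)
      · exact Or.inl (Or.inl hd)
      · exact Or.inr ⟨z, hz, hd⟩

-- the nearest-neighbour search is exact on a sorted list: none iff empty, else a non-negative
-- achieved lower bound of all distances
lemma pvNearest_spec (s : List Int) (x0 : Int) (hs : List.Pairwise (· ≤ ·) s) :
    (pvNearest s x0 = none ∧ s = []) ∨
      ∃ b, pvNearest s x0 = some b ∧ 0 ≤ b ∧ (∃ c ∈ s, b = |x0 - c|) ∧
        (∀ v ∈ s, b ≤ |x0 - v|) := by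
  obtain ⟨hile, hlt, hge⟩ := PySem.List.bisectLeft_spec s x0 hs
  have hmono : ∀ (j k : Nat) (hk : k < s.length) (hjk : j ≤ k), s[j]'(by omega) ≤ s[k] := by
    intro j k hk hjk
    rcases Nat.lt_or_eq_of_le hjk with h | h
    · exact List.pairwise_iff_getElem.mp hs j k (by omega) hk h
    · subst h; exact le_refl _
  have hbound : ∀ v ∈ s, ∃ (j : Nat) (hj : j < s.length), s[j] = v :=
    fun v hv => List.mem_iff_getElem.mp hv
  unfold pvNearest
  by_cases h1 : PySem.List.bisectLeft s x0 < s.length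
  · rw [if_pos h1]
    set i := PySem.List.bisectLeft s x0 with hidef
    have hgi : x0 ≤ s[i] := hge i h1 le_rfl
    have hdi : s.getD i 0 = s[i] := List.getD_eq_getElem s 0 h1
    by_cases h2 : 0 < i
    · rw [if_pos h2]
      have hi1 : i - 1 < s.length := by omega
      have hli : s[i-1] < x0 := hlt (i-1) hi1 (by omega)
      have hdi1 : s.getD (i-1) 0 = s[i-1] := List.getD_eq_getElem s 0 hi1
      have habs1 : x0 - s[i-1] = |x0 - s[i-1]| := by rw [abs_of_pos]; omega
      have habs2 : s[i] - x0 = |x0 - s[i]| := by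
        rw [abs_of_nonpos (show x0 - s[i] ≤ 0 by omega)]; ring
      have hlow : ∀ v ∈ s, (if s[i] - x0 < x0 - s[i-1] then s[i] - x0 else x0 - s[i-1]) ≤ |x0 - v| := by
        intro v hv
        obtain ⟨j, hj, rfl⟩ := hbound v hv
        by_cases hji : j < i
        · have h3 : s[j] ≤ s[i-1] := hmono j (i-1) hi1 (by omega)
          have h4 : s[j] < x0 := hlt j hj hji
          rw [abs_of_pos (show (0:Int) < x0 - s[j] by omega)]
          split_ifs <;> omega
        · have h3 : s[i] ≤ s[j] := hmono i j hj (by omega)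
          have h4 : x0 ≤ s[j] := hge j hj (by omega)
          rw [abs_of_nonpos (show x0 - s[j] ≤ 0 by omega)]
          split_ifs <;> omega
      right
      rw [hdi, hdi1]
      by_cases hcmp : s[i] - x0 < x0 - s[i-1]
      · rw [if_pos hcmp]
        refine ⟨_, rfl, by omega, ⟨s[i], List.getElem_mem h1, habs2⟩, ?_⟩
        intro v hv
        have := hlow v hv
        rwa [if_pos hcmp] at this
      · rw [if_neg hcmp]
        refine ⟨_, rfl, by omega, ⟨s[i-1], List.getElem_mem hi1, habs1⟩, ?_⟩
        intro v hv
        have := hlow v hv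
        rwa [if_neg hcmp] at this
    · rw [if_neg h2]
      have hi0 : i = 0 := by omega
      right
      refine ⟨s.getD i 0 - x0, rfl, by rw [hdi]; omega, ?_, ?_⟩
      · refine ⟨s[i], List.getElem_mem h1, ?_⟩
        rw [hdi, abs_of_nonpos (show x0 - s[i] ≤ 0 by omega)]; ring
      · intro v hv
        obtain ⟨j, hj, rfl⟩ := hbound v hv
        have h3 : s[i] ≤ s[j] := hmono i j hj (by omega)
        have h4 : x0 ≤ s[j] := hge j hj (by omega)
        rw [hdi, abs_of_nonpos (show x0 - s[j] ≤ 0 by omega)]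
        omega
  · rw [if_neg h1]
    have hieq : PySem.List.bisectLeft s x0 = s.length := by omega
    by_cases h2 : 0 < PySem.List.bisectLeft s x0
    · rw [if_pos h2]
      set i := PySem.List.bisectLeft s x0 with hidef
      have hi1 : i - 1 < s.length := by omega
      have hli : s[i-1] < x0 := hlt (i-1) hi1 (by omega)
      have hdi1 : s.getD (i-1) 0 = s[i-1] := List.getD_eq_getElem s 0 hi1
      right
      refine ⟨x0 - s.getD (i-1) 0, rfl, by rw [hdi1]; omega, ?_, ?_⟩
      · exact ⟨s[i-1], List.getElem_mem hi1, by rw [hdi1, abs_of_pos (by omega)]⟩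
      · intro v hv
        obtain ⟨j, hj, rfl⟩ := hbound v hv
        have h3 : s[j] ≤ s[i-1] := hmono j (i-1) hi1 (by omega)
        have h4 : s[j] < x0 := hlt j hj (by omega)
        rw [hdi1, abs_of_pos (by omega)]
        omega
    · rw [if_neg h2]
      left
      refine ⟨rfl, ?_⟩
      have : s.length = 0 := by omega
      exact List.length_eq_zero_iff.mp this

-- existence of a close element of s transfers between myPeaks and its sorted first-coordinates
lemma exists_close_iff (myPeaks : List (List Int)) (x0 c : Int) :
    (∃ v ∈ PySem.List.sorted (myPeaks.map pvHd) (fun v => v) false, |x0 - v| < c)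
      ↔ ∃ y ∈ myPeaks, |x0 - pvHd y| < c := by
  constructor
  · rintro ⟨v, hv, hvc⟩
    obtain ⟨y, hy, rfl⟩ := List.mem_map.mp ((PySem.List.mem_sorted _ _ _ _).mp hv)
    exact ⟨y, hy, hvc⟩
  · rintro ⟨y, hy, hyc⟩
    exact ⟨pvHd y, (PySem.List.mem_sorted _ _ _ _).mpr (List.mem_map.mpr ⟨y, hy, rfl⟩), hyc⟩

-- the two per-element verdicts agree when 0 ≤ windowSize
lemma verdict_eq (myPeaks : List (List Int)) (windowSize : Int) (hw : 0 ≤ windowSize)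
    (x : List Int) :
    (!decide (pvMinD myPeaks windowSize (pvHd x) < windowSize))
      = pvKeep (PySem.List.sorted (myPeaks.map pvHd) (fun v => v) false) windowSize x := by
  set s := PySem.List.sorted (myPeaks.map pvHd) (fun v => v) false with hsdef
  have hs : List.Pairwise (· ≤ ·) s := PySem.List.sorted_pairwise _ _
  have hA : pvMinD myPeaks windowSize (pvHd x) < windowSize
      ↔ ∃ y ∈ myPeaks, |pvHd x - pvHd y| < windowSize := by
    rw [pvMinD, pvMinD_lt_iff]
    constructor
    · rintro (h | h)
      · omega
      · exact h
    · exact Or.inr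
  rcases pvNearest_spec s (pvHd x) hs with ⟨hnone, hnil⟩ | ⟨b, hsome, _hb0, ⟨c, hc, hbc⟩, hlow⟩
  · have hmap : myPeaks.map pvHd = [] := by
      have hperm := PySem.List.sorted_perm (myPeaks.map pvHd) (fun v => v) false
      have hnil' : PySem.List.sorted (myPeaks.map pvHd) (fun v => v) false = [] := hnil
      rw [hnil'] at hperm
      exact hperm.symm.eq_nil
    have hP : myPeaks = [] := List.map_eq_nil_iff.mp hmap
    subst hP
    simp [pvKeep, hnone, hA]
  · have hiff : (∃ y ∈ myPeaks, |pvHd x - pvHd y| < windowSize) ↔ b < windowSize := by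
      rw [← exists_close_iff myPeaks (pvHd x) windowSize, ← hsdef]
      constructor
      · rintro ⟨v, hv, hvc⟩; exact lt_of_le_of_lt (hlow v hv) hvc
      · intro h; exact ⟨c, hc, by omega⟩
    simp only [pvKeep, hsome, hA, hiff]
    by_cases h : b < windowSize
    · simp [h, (show ¬ windowSize ≤ b by omega)]
    · simp [h, (show windowSize ≤ b by omega)]

-- ===== VERDICT (by name: the statement is the Claim_ definition above) =====
theorem cleanupEnergyPeaks_spec : Claim_unchanged_cleanupEnergyPeaks := by
  intro myPeaksE myPeaks windowSize _dom _pre hnd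
  rw [cleanupEnergyPeaks_eq_filter, alt_eq_filter]
  by_cases hE : myPeaksE = []
  · subst hE; simp
  · have hw : 0 ≤ windowSize := by
      by_contra h
      exact hnd ⟨by omega, hE⟩
    exact List.filter_congr (fun x _ => verdict_eq myPeaks windowSize hw x)

theorem cleanupEnergyPeaks_changed : Claim_changed_cleanupEnergyPeaks := by
  unfold Claim_changed_cleanupEnergyPeaks; decide

theorem cleanupEnergyPeaks_tight : Claim_exact_cleanupEnergyPeaks := by
  intro myPeaksE myPeaks windowSize _dom _pre hD
  obtain ⟨hw, hE⟩ := hD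
  have hA : cleanupEnergyPeaks myPeaksE myPeaks windowSize = [] := by
    rw [cleanupEnergyPeaks_eq_filter]
    apply List.filter_eq_nil_iff.mpr
    intro x _
    have : pvMinD myPeaks windowSize (pvHd x) < windowSize := by
      rw [pvMinD, pvMinD_lt_iff]
      exact Or.inl (by omega)
    simp [this]
  have hB : cleanupEnergyPeaks_alt myPeaksE myPeaks windowSize = myPeaksE := by
    rw [alt_eq_filter]
    apply List.filter_eq_self.mpr
    intro x _
    set s := PySem.List.sorted (myPeaks.map pvHd) (fun v => v) false with hsdef
    rcases pvNearest_spec s (pvHd x) (PySem.List.sorted_pairwise _ _)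
      with ⟨hnone, _⟩ | ⟨b, hsome, hb0, _, _⟩
    · simp [pvKeep, hnone]
    · simp [pvKeep, hsome]; omega
  rw [hA, hB]
  exact fun h => hE h.symm
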